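-- pv_equiv track=rewrite | github.com/redmanduck/0x194 | fieldtest/ssabpisa_Field.py | isField
-- ===== SOURCE A (Python) =====
-- def eugcd(tup):
--
-- 	if(tup[0] == 0):
-- 		return tup[1]
-- 	elif(tup[1] == 0):
-- 		return tup[0]
-- 	elif(tup[1] == tup[0]):
-- 		return tup[1]
--
-- 	tup_n = (tup[1], tup[0] % tup[1])
-- 	return eugcd(tup_n)
--
-- def isField(R, n):
-- 	for a in R:
-- 		if(a == 0):
-- 			continue
-- 		gcd = eugcd((a, n))
-- 		if gcd != 1:
-- 			#there is an entry in R where there si no MI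
-- 			return False
-- 	return True
-- ===== SOURCE B (Python) =====
-- def isField(R, n):
-- 	def g(x, y):
-- 		while y:
-- 			x, y = y, x % y
-- 		return x
-- 	return all(g(a, n) == 1 for a in R if a != 0)
-- ===== Notes on version B (the rewrite author's own statement) =====
-- stated objective: alternative
-- what changed: Replaced the early-return loop over R calling the recursive three-base-case eugcd by a filter-and-all pipeline (all(... for a in R if a != 0)) with the gcd computed by an inlined iterative Euclidean while-loop.
import Mathlib
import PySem

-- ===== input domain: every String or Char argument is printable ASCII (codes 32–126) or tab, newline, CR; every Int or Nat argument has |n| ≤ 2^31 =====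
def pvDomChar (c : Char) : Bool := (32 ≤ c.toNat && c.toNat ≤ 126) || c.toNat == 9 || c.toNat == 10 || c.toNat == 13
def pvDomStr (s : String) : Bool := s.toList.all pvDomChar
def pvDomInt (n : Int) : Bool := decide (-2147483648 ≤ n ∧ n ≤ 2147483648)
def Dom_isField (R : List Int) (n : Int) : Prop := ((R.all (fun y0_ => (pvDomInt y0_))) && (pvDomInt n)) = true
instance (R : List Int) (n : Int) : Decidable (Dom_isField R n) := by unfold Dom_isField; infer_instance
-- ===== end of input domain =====

-- B replaces A's early-return loop over R calling the recursive eugcd by a filter-and-all pipeline with an inlined iterative Euclidean gcd loop (objective: alternative decomposition; same cost).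

-- |a % b| < |b| for b ≠ 0 (Python floor mod); used by both ports' termination.
theorem pv_natAbs_mod_lt (a b : Int) (hb : b ≠ 0) :
    (PySem.Int.mod a b).natAbs < b.natAbs := by
  rcases lt_trichotomy b 0 with h | h | h
  · have := PySem.Int.mod_neg_bounds a h
    omega
  · exact absurd h hb
  · have h1 := PySem.Int.mod_nonneg a h
    have h2 := PySem.Int.mod_lt a h
    omega

-- ===== PORT A =====
def eugcd (tup : Int × Int) : Int :=
  if tup.1 = 0 then tup.2
  else if h2 : tup.2 = 0 then tup.1
  else if tup.2 = tup.1 then tup.2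
  else eugcd (tup.2, PySem.Int.mod tup.1 tup.2)
termination_by tup.2.natAbs
decreasing_by exact pv_natAbs_mod_lt tup.1 tup.2 h2

def isField (R : List Int) (n : Int) : Bool :=
  match R with
  | [] => true
  | a :: rest =>
    if a = 0 then isField rest n
    else if eugcd (a, n) ≠ 1 then false
    else isField rest n

-- ===== PORT B =====
-- the inner 'while y: x, y = y, x % y; return x' helper g
def gLoop (x y : Int) : Int :=
  if h : y = 0 then x else gLoop y (PySem.Int.mod x y)
termination_by y.natAbs
decreasing_by exact pv_natAbs_mod_lt x y h

-- all(g(a, n) == 1 for a in R if a != 0)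
def isField_alt (R : List Int) (n : Int) : Bool :=
  (R.filter (fun a => a ≠ 0)).all (fun a => gLoop a n == 1)

-- ===== PRECONDITION & SPEC =====
def Spec_isField (R : List Int) (n : Int) (out : Bool) : Prop := out = isField_alt R n
instance (R : List Int) (n : Int) (out : Bool) : Decidable (Spec_isField R n out) := by unfold Spec_isField; infer_instance

-- ===== CLAIM (what is proved, stated in full; the proofs are below) =====
def Claim_equal_isField : Prop := ∀ (R : List Int) (n : Int), Dom_isField R n → Spec_isField R n (isField R n)

-- ===== LEMMAS AND PROOFS =====

theorem pv_mod_zero_left (y : Int) : PySem.Int.mod 0 y = 0 :=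
  (PySem.Int.mod_eq_zero_iff_dvd 0 y).mpr (dvd_zero y)

theorem pv_mod_self (x : Int) : PySem.Int.mod x x = 0 :=
  (PySem.Int.mod_eq_zero_iff_dvd x x).mpr dvd_rfl

theorem eugcd_eq_gLoop_aux : ∀ (k : Nat) (x y : Int), y.natAbs ≤ k → eugcd (x, y) = gLoop x y := by
  intro k
  induction k with
  | zero =>
    intro x y hk
    have hy : y = 0 := by omega
    subst hy
    rw [eugcd, gLoop]
    simp only [dif_pos rfl]
    split_ifs with h1
    · exact h1.symm
    · rfl
  | succ k ih =>
    intro x y hk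
    by_cases hy : y = 0
    · subst hy
      rw [eugcd, gLoop]
      simp only [dif_pos rfl]
      split_ifs with h1
      · exact h1.symm
      · rfl
    · have hrec : eugcd (y, PySem.Int.mod x y) = gLoop y (PySem.Int.mod x y) := by
        apply ih
        have := pv_natAbs_mod_lt x y hy
        omega
      rw [gLoop, dif_neg hy, eugcd]
      by_cases hx : x = 0
      · subst hx
        rw [pv_mod_zero_left, gLoop, dif_pos rfl]
        simp
      · by_cases hyx : y = x
        · subst hyx
          rw [pv_mod_self, gLoop, dif_pos rfl]
          simp [hx]
        · simp only [hx, hy, hyx, if_false]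
          simpa using hrec

theorem eugcd_eq_gLoop (x y : Int) : eugcd (x, y) = gLoop x y :=
  eugcd_eq_gLoop_aux y.natAbs x y le_rfl

theorem isField_eq_alt (R : List Int) (n : Int) : isField R n = isField_alt R n := by
  induction R with
  | nil => rfl
  | cons a rest ih =>
    rw [isField]
    by_cases ha : a = 0
    · simp only [ha, if_pos rfl, ih, isField_alt, List.filter]
      simp
    · simp only [if_neg ha]
      have hfilter : isField_alt (a :: rest) n
          = ((gLoop a n == 1) && isField_alt rest n) := by
        simp [isField_alt, List.filter, ha]
      rw [hfilter, eugcd_eq_gLoop]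
      by_cases hg : gLoop a n = 1
      · simp [hg, ih]
      · simp [hg]

-- ===== VERDICT (by name: the statement is the Claim_ definition above) =====
theorem isField_spec : Claim_equal_isField :=
  fun R n _ => isField_eq_alt R n
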